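-- pv_equiv track=rewrite | github.com/GitJeremyy/big_data_structure | complete_final_project/services/calculate_stats.py | extract_projection_counts_by_type
-- ===== SOURCE A (Python) =====
-- from typing import Dict, List
--
-- def extract_projection_counts_by_type(fields: List[Dict]) -> Dict[str, int]:
--     """
--     Extract counts of projection fields by type.
--     Uses the type from parsed field dict (already inferred from schema by query_parser).
--
--     Args:
--         fields: List of field dicts with 'name' and 'type' (types from parser)
--
--     Returns:
--         Dict with 'integer', 'string', 'date' counts
--     """
--     counts = {"integer": 0, "string": 0, "date": 0}
--
--     for field in fields:
--         # Use type from parsed field dict (already inferred from schema by parser)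
--         field_type = field.get("type", "integer").lower()
--
--         if field_type in ["integer", "number", "boolean", "reference"]:
--             counts["integer"] += 1
--         elif field_type == "string":
--             counts["string"] += 1
--         elif field_type == "date":
--             counts["date"] += 1
--
--     return counts
-- ===== SOURCE B (Python) =====
-- def extract_projection_counts_by_type(fields):
--     # Table-first: build a frequency table of the raw lowered types, then aggregate.
--     types = [f.get("type", "integer").lower() for f in fields]
--     freq = {}
--     for t in types:
--         freq[t] = freq.get(t, 0) + 1
--     return {
--         "integer": freq.get("integer", 0) + freq.get("number", 0)
--                    + freq.get("boolean", 0) + freq.get("reference", 0),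
--         "string": freq.get("string", 0),
--         "date": freq.get("date", 0),
--     }
-- ===== Notes on version B (the rewrite author's own statement) =====
-- stated objective: alternative
-- what changed: B first builds a full frequency table of the raw lowered type strings and then assembles the three output entries by aggregating table lookups, instead of A's per-field branch dispatch incrementing the result dict.
import Mathlib
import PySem

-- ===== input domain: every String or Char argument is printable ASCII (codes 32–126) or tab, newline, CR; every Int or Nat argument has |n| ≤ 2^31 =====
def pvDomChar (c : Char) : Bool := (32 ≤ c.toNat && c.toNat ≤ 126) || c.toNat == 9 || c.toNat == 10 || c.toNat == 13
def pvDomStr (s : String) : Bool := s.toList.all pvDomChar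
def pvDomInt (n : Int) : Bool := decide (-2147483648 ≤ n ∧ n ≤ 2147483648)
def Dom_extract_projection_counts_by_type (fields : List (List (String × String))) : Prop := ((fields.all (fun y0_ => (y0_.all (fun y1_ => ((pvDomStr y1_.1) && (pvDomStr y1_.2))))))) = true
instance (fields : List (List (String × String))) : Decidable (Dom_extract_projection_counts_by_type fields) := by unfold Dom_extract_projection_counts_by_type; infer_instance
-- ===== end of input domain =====

-- B first builds a full frequency table of the raw lowered type strings and then assembles
-- the three output entries by aggregating table lookups (alternative decomposition, same O(n) cost).

-- ===== PORT A =====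
def extract_projection_counts_by_type (fields : List (List (String × String))) : List (String × Int) :=
  (fields.foldl
    (fun d field =>
      let field_type := PySem.Str.lower ((PySem.Dict.mk field).getD "type" "integer")
      if ["integer", "number", "boolean", "reference"].contains field_type then
        d.modify "integer" 0 (· + 1)
      else if field_type = "string" then
        d.modify "string" 0 (· + 1)
      else if field_type = "date" then
        d.modify "date" 0 (· + 1)
      else d)
    (PySem.Dict.ofList [("integer", (0 : Int)), ("string", 0), ("date", 0)])).items

-- ===== PORT B =====
def extract_projection_counts_by_type_alt (fields : List (List (String × String))) : List (String × Int) :=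
  let types := fields.map (fun f => PySem.Str.lower ((PySem.Dict.mk f).getD "type" "integer"))
  let freq := types.foldl (fun d t => d.insert t (d.getD t 0 + 1)) PySem.Dict.empty
  [("integer", freq.getD "integer" 0 + freq.getD "number" 0
               + freq.getD "boolean" 0 + freq.getD "reference" 0),
   ("string", freq.getD "string" 0),
   ("date", freq.getD "date" 0)]

-- ===== PRECONDITION & SPEC =====
def Spec_extract_projection_counts_by_type (fields : List (List (String × String))) (out : List (String × Int)) : Prop := out = extract_projection_counts_by_type_alt fields
instance (fields : List (List (String × String))) (out : List (String × Int)) : Decidable (Spec_extract_projection_counts_by_type fields out) := by unfold Spec_extract_projection_counts_by_type; infer_instance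

-- ===== CLAIM (what is proved, stated in full; the proofs are below) =====
def Claim_equal_extract_projection_counts_by_type : Prop := ∀ (fields : List (List (String × String))), Dom_extract_projection_counts_by_type fields → Spec_extract_projection_counts_by_type fields (extract_projection_counts_by_type fields)

-- ===== LEMMAS AND PROOFS =====

/-- Characterisation of A's dict-updating loop from an arbitrary three-entry state:
each entry grows by the count of fields falling in its category. -/
lemma foldA_eq (fields : List (List (String × String))) : ∀ (a b c : Int),
    fields.foldl
      (fun d field =>
        let field_type := PySem.Str.lower ((PySem.Dict.mk field).getD "type" "integer")
        if ["integer", "number", "boolean", "reference"].contains field_type then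
          d.modify "integer" 0 (· + 1)
        else if field_type = "string" then
          d.modify "string" 0 (· + 1)
        else if field_type = "date" then
          d.modify "date" 0 (· + 1)
        else d)
      (PySem.Dict.mk [("integer", a), ("string", b), ("date", c)])
    = PySem.Dict.mk
        [("integer", a + (fields.countP (fun f =>
            ["integer", "number", "boolean", "reference"].contains
              (PySem.Str.lower ((PySem.Dict.mk f).getD "type" "integer"))) : Int)),
         ("string", b + (fields.countP (fun f =>
            PySem.Str.lower ((PySem.Dict.mk f).getD "type" "integer") = "string") : Int)),
         ("date", c + (fields.countP (fun f =>
            PySem.Str.lower ((PySem.Dict.mk f).getD "type" "integer") = "date") : Int))] := by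
  induction fields with
  | nil => intro a b c; simp
  | cons f rest ih =>
    intro a b c
    simp only [List.foldl_cons, List.countP_cons]
    by_cases h1 : ["integer", "number", "boolean", "reference"].contains
        (PySem.Str.lower ((PySem.Dict.mk f).getD "type" "integer"))
    · rw [if_pos h1,
        show (PySem.Dict.mk [("integer", a), ("string", b), ("date", c)]).modify "integer" 0 (· + 1)
          = PySem.Dict.mk [("integer", a + 1), ("string", b), ("date", c)] from rfl, ih]
      have h1' : PySem.Str.lower ((PySem.Dict.mk f).getD "type" "integer") = "integer"
          ∨ PySem.Str.lower ((PySem.Dict.mk f).getD "type" "integer") = "number"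
          ∨ PySem.Str.lower ((PySem.Dict.mk f).getD "type" "integer") = "boolean"
          ∨ PySem.Str.lower ((PySem.Dict.mk f).getD "type" "integer") = "reference" := by
        simpa using h1
      rcases h1' with h | h | h | h <;> simp [h] <;> omega
    · rw [if_neg h1]
      by_cases h2 : PySem.Str.lower ((PySem.Dict.mk f).getD "type" "integer") = "string"
      · rw [if_pos h2,
          show (PySem.Dict.mk [("integer", a), ("string", b), ("date", c)]).modify "string" 0 (· + 1)
            = PySem.Dict.mk [("integer", a), ("string", b + 1), ("date", c)] from rfl, ih]
        simp [h2]
        omega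
      · rw [if_neg h2]
        by_cases h3 : PySem.Str.lower ((PySem.Dict.mk f).getD "type" "integer") = "date"
        · rw [if_pos h3,
            show (PySem.Dict.mk [("integer", a), ("string", b), ("date", c)]).modify "date" 0 (· + 1)
              = PySem.Dict.mk [("integer", a), ("string", b), ("date", c + 1)] from rfl, ih]
          simp [h3]
          omega
        · rw [if_neg h3, ih]
          simp [h2, h3]
          simpa using h1

/-- Counting membership in the fixed four-element group splits into four exact counts. -/
lemma countP_group (ts : List String) :
    ts.countP (fun t => ["integer", "number", "boolean", "reference"].contains t)
    = ts.count "integer" + ts.count "number" + ts.count "boolean" + ts.count "reference" := by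
  induction ts with
  | nil => simp
  | cons t rest ih =>
    simp only [List.countP_cons, List.count_cons]
    by_cases h1 : t = "integer" <;> by_cases h2 : t = "number" <;>
      by_cases h3 : t = "boolean" <;> by_cases h4 : t = "reference" <;>
      simp_all <;> omega

/-- A count over B's mapped type list equals a countP over the raw fields. -/
lemma count_map_cat (fields : List (List (String × String))) (s : String) :
    (fields.map (fun f => PySem.Str.lower ((PySem.Dict.mk f).getD "type" "integer"))).count s
    = fields.countP (fun f => PySem.Str.lower ((PySem.Dict.mk f).getD "type" "integer") = s) := by
  simp only [List.count_eq_countP, List.countP_map, Function.comp_def]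
  exact List.countP_congr (fun a _ => by simp)

-- ===== VERDICT (by name: the statement is the Claim_ definition above) =====
theorem extract_projection_counts_by_type_spec : Claim_equal_extract_projection_counts_by_type := by
  intro fields _
  unfold Spec_extract_projection_counts_by_type
  unfold extract_projection_counts_by_type extract_projection_counts_by_type_alt
  rw [show (PySem.Dict.ofList [("integer", (0 : Int)), ("string", 0), ("date", 0)])
        = PySem.Dict.mk [("integer", (0 : Int)), ("string", 0), ("date", 0)] from rfl,
      foldA_eq fields 0 0 0]
  simp only [PySem.Dict.getD_foldl_insert_add_one, PySem.Dict.getD_empty, zero_add]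
  have hg := countP_group (fields.map (fun f => PySem.Str.lower ((PySem.Dict.mk f).getD "type" "integer")))
  rw [List.countP_map] at hg
  simp only [Function.comp_def] at hg
  simp only [count_map_cat] at hg
  simp only [List.cons.injEq, Prod.mk.injEq, true_and, and_true]
  refine ⟨?_, ?_, ?_⟩
  · rw [count_map_cat, count_map_cat, count_map_cat, count_map_cat]
    omega
  · rw [count_map_cat]
  · rw [count_map_cat]
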